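-- pv_equiv track=rewrite | github.com/mizaqq/Magisterka | src/utils/annotation_pipeline.py | match_boxes_within_distance
-- ===== SOURCE A (Python) =====
-- def match_boxes_within_distance(boxes, threshold=19):
--     matched_groups = []
--
--     grouped = [False] * len(boxes)
--
--     for i in range(len(boxes)):
--         if grouped[i]:
--             continue
--
--         group = [boxes[i]]
--         label1 = boxes[i][1]  # Label of box 1
--         box1 = boxes[i][0]  # Coordinates of box 1
--
--         ymin1 = min([point[1] for point in box1])  # Find ymin for box 1
--         ymax1 = max([point[1] for point in box1])  # Find ymax for box 1
--
--         for j in range(i + 1, len(boxes)):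
--             if grouped[j]:  # Skip already grouped boxes
--                 continue
--             box2 = boxes[j][0]  # Coordinates of box 2
--             label2 = boxes[j][1]  # Label of box 2
--             ymin2 = min([point[1] for point in box2])  # Find ymin for box 2
--             ymax2 = max([point[1] for point in box2])  # Find ymax for box 2
--
--             if abs(ymin1 - ymin2) < threshold or abs(ymax1 - ymax2) < threshold:
--                 group.append(boxes[j])
--                 grouped[j] = True
--
--         group.sort(key=lambda box: min([point[0] for point in box[0]]))  # Sort by xmin
--         line = [box[1][0] for box in group]
--         matched_groups.append(line)
--
--     return matched_groups
-- ===== SOURCE B (Python) =====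
-- def match_boxes_within_distance(boxes, threshold=19):
--     # One forward pass: each box joins the group of the EARLIEST seed whose
--     # ymin/ymax lies within threshold, else it opens a new group as its seed;
--     # no flags, no rescans of later boxes.  Finally each group is sorted by
--     # xmin and rendered to its first labels.
--     groups = []  # each entry: (seed_ymin, seed_ymax, boxes of the group)
--     for box in boxes:
--         ys = [p[1] for p in box[0]]
--         ymin, ymax = min(ys), max(ys)
--         for g in groups:
--             if abs(g[0] - ymin) < threshold or abs(g[1] - ymax) < threshold:
--                 g[2].append(box)
--                 break
--         else:
--             groups.append((ymin, ymax, [box]))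
--     out = []
--     for _, _, g in groups:
--         g.sort(key=lambda b: min(p[0] for p in b[0]))
--         out.append([b[1][0] for b in g])
--     return out
-- ===== Notes on version B (the rewrite author's own statement) =====
-- stated objective: alternative
-- what changed: B replaces A's seed-then-rescan nested loops over a grouped-flags array by a single forward pass that assigns each box to the group of the earliest matching seed (opening a new group when none matches), then renders all groups at the end; correctness rests on the fact that a box is grouped by A exactly with the first earlier seed whose y-extent matches it.
import Mathlib
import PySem

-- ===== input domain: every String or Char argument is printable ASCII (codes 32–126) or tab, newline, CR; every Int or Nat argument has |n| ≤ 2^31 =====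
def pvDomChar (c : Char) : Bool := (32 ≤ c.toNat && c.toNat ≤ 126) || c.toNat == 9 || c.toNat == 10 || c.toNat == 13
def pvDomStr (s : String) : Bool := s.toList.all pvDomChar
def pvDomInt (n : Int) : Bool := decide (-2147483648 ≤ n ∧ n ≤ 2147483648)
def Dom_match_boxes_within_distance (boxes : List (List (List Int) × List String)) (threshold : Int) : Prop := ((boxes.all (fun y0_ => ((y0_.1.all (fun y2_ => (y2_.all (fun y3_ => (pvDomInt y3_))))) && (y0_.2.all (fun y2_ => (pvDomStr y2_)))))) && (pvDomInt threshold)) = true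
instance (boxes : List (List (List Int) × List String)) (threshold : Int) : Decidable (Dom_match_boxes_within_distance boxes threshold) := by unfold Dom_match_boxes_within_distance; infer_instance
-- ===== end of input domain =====

-- B replaces A's seed-then-rescan nested index loops with flags by ONE forward pass that
-- assigns each box to the earliest matching seed's group (opening a new group otherwise),
-- rendering all groups at the end (objective: alternative).

-- ===== PORT A =====
-- min([point[1] for point in box]) (0-defaults are unreachable under Pre_)
def pvYminA (c : List (List Int)) : Int :=
  (PySem.List.min? (c.map fun p => PySem.List.pyGetD p 1 0) (fun y => y)).getD 0
-- max([point[1] for point in box])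
def pvYmaxA (c : List (List Int)) : Int :=
  (PySem.List.max? (c.map fun p => PySem.List.pyGetD p 1 0) (fun y => y)).getD 0
-- min([point[0] for point in box]) (sort key)
def pvXminA (c : List (List Int)) : Int :=
  (PySem.List.min? (c.map fun p => PySem.List.pyGetD p 0 0) (fun y => y)).getD 0

-- inner 'for j in range(i+1, len(boxes))' loop, state (group, grouped)
def pvInnerA (boxes : List (List (List Int) × List String)) (threshold y1min y1max : Int) :
    Nat → List Bool → List (List (List Int) × List String) →
    (List (List (List Int) × List String) × List Bool)
  | j, grouped, group =>
    if h : j < boxes.length then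
      if grouped.getD j false then
        pvInnerA boxes threshold y1min y1max (j+1) grouped group
      else
        let b := boxes.getD j ([], [])
        let y2min := pvYminA b.1
        let y2max := pvYmaxA b.1
        if |y1min - y2min| < threshold ∨ |y1max - y2max| < threshold then
          pvInnerA boxes threshold y1min y1max (j+1) (grouped.set j true) (group ++ [b])
        else
          pvInnerA boxes threshold y1min y1max (j+1) grouped group
    else
      (group, grouped)
  termination_by j => boxes.length - j
  decreasing_by all_goals omega

-- outer 'for i in range(len(boxes))' loop
def pvOuterA (boxes : List (List (List Int) × List String)) (threshold : Int) :
    Nat → List Bool → List (List String)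
  | i, grouped =>
    if h : i < boxes.length then
      if grouped.getD i false then
        pvOuterA boxes threshold (i+1) grouped
      else
        let b := boxes.getD i ([], [])
        let y1min := pvYminA b.1
        let y1max := pvYmaxA b.1
        let res := pvInnerA boxes threshold y1min y1max (i+1) grouped [b]
        ((PySem.List.sorted res.1 (fun bx => pvXminA bx.1) false).map
          (fun bx => PySem.List.pyGetD bx.2 0 "")) :: pvOuterA boxes threshold (i+1) res.2
    else
      []
  termination_by i => boxes.length - i
  decreasing_by all_goals omega

def match_boxes_within_distance (boxes : List (List (List Int) × List String)) (threshold : Int) : List (List String) :=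
  pvOuterA boxes threshold 0 (List.replicate boxes.length false)

-- ===== PORT B =====
def pvYminB (c : List (List Int)) : Int :=
  (PySem.List.min? (c.map fun p => PySem.List.pyGetD p 1 0) (fun y => y)).getD 0
def pvYmaxB (c : List (List Int)) : Int :=
  (PySem.List.max? (c.map fun p => PySem.List.pyGetD p 1 0) (fun y => y)).getD 0
def pvXminB (c : List (List Int)) : Int :=
  (PySem.List.min? (c.map fun p => PySem.List.pyGetD p 0 0) (fun y => y)).getD 0

-- the 'for g in groups: … break / else: append' inner scan: append box to the
-- EARLIEST matching group, else open a new group at the end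
def pvAssignB (t ymin ymax : Int) (box : List (List Int) × List String) :
    List (Int × Int × List (List (List Int) × List String)) →
    List (Int × Int × List (List (List Int) × List String))
  | [] => [(ymin, ymax, [box])]
  | g :: rest =>
    if |g.1 - ymin| < t ∨ |g.2.1 - ymax| < t then (g.1, g.2.1, g.2.2 ++ [box]) :: rest
    else g :: pvAssignB t ymin ymax box rest

-- one iteration of the forward pass ('for box in boxes')
def pvStepB (t : Int) (st : List (Int × Int × List (List (List Int) × List String)))
    (box : List (List Int) × List String) :
    List (Int × Int × List (List (List Int) × List String)) :=
  pvAssignB t (pvYminB box.1) (pvYmaxB box.1) box st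

-- rendering of one finished group: sort by xmin, take first labels
def pvRenderB (g : Int × Int × List (List (List Int) × List String)) : List String :=
  (PySem.List.sorted g.2.2 (fun bx => pvXminB bx.1) false).map
    (fun bx => PySem.List.pyGetD bx.2 0 "")

def match_boxes_within_distance_alt (boxes : List (List (List Int) × List String)) (threshold : Int) : List (List String) :=
  (boxes.foldl (pvStepB threshold) []).map pvRenderB

-- ===== PRECONDITION & SPEC =====
-- Pre_ excludes exactly the inputs where Python A raises: a box with an empty coordinate
-- list (min()/max() of an empty sequence), a point with fewer than 2 coordinates
-- (point[1] / point[0] IndexError), or an empty label list (box[1][0] IndexError).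
def Pre_match_boxes_within_distance (boxes : List (List (List Int) × List String)) (threshold : Int) : Prop :=
  ∀ b ∈ boxes, b.1 ≠ [] ∧ (∀ p ∈ b.1, 2 ≤ p.length) ∧ b.2 ≠ []
instance (boxes : List (List (List Int) × List String)) (threshold : Int) : Decidable (Pre_match_boxes_within_distance boxes threshold) := by unfold Pre_match_boxes_within_distance; infer_instance

def pvWitness_match_boxes_within_distance : (List (List (List Int) × List String)) × Int :=
  ([([[0, 1], [4, 7]], ["a"]), ([[2, 30], [5, 40]], ["b"])], 19)

def Spec_match_boxes_within_distance (boxes : List (List (List Int) × List String)) (threshold : Int) (out : List (List String)) : Prop := out = match_boxes_within_distance_alt boxes threshold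
instance (boxes : List (List (List Int) × List String)) (threshold : Int) (out : List (List String)) : Decidable (Spec_match_boxes_within_distance boxes threshold out) := by unfold Spec_match_boxes_within_distance; infer_instance

-- ===== CLAIM (what is proved, stated in full; the proofs are below) =====
def Claim_equal_match_boxes_within_distance : Prop := ∀ (boxes : List (List (List Int) × List String)) (threshold : Int), Dom_match_boxes_within_distance boxes threshold → Pre_match_boxes_within_distance boxes threshold → Spec_match_boxes_within_distance boxes threshold (match_boxes_within_distance boxes threshold)

-- ===== LEMMAS AND PROOFS =====

-- abbreviations used only by the proofs
def pvGet (boxes : List (List (List Int) × List String)) (k : Nat) : (List (List Int) × List String) :=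
  boxes.getD k ([], [])

-- the ungrouped indices ≥ j, in order
def pvUg (n j : Nat) (g : List Bool) : List Nat :=
  (List.range' j (n - j)).filter (fun k => !g.getD k false)

-- the matching predicate of the inner loop, on indices
def pvP (boxes : List (List (List Int) × List String)) (threshold y1min y1max : Int) (k : Nat) : Bool :=
  decide (|y1min - pvYminA (pvGet boxes k).1| < threshold ∨ |y1max - pvYmaxA (pvGet boxes k).1| < threshold)

-- proof-side intermediate: the peel-off recursion on precomputed items, emitting lines
def pvGoB (threshold : Int) :
    List (Int × Int × (List (List Int) × List String)) → List (List String)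
  | [] => []
  | s :: rest =>
    let part := rest.partition (fun it => decide (|s.1 - it.1| < threshold ∨ |s.2.1 - it.2.1| < threshold))
    ((PySem.List.sorted (s.2.2 :: part.1.map (fun it => it.2.2)) (fun bx => pvXminB bx.1) false).map
      (fun bx => PySem.List.pyGetD bx.2 0 "")) :: pvGoB threshold part.2
  termination_by l => l.length
  decreasing_by
    simp only [List.partition_eq_filter_filter]
    exact Nat.lt_succ_of_le (List.length_filter_le _ _)

lemma pvGetD_set_ne (g : List Bool) (j k : Nat) (h : k ≠ j) :
    (g.set j true).getD k false = g.getD k false := by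
  simp [List.getD, List.getElem?_set_ne (Ne.symm h)]

lemma pvGetD_set_self (g : List Bool) (j : Nat) (h : j < g.length) :
    (g.set j true).getD j false = true := by
  simp [List.getD, h]

lemma pvUg_cons (n j : Nat) (g : List Bool) (h : j < n) :
    pvUg n j g = if g.getD j false then pvUg n (j+1) g else j :: pvUg n (j+1) g := by
  unfold pvUg
  have : n - j = (n - (j+1)) + 1 := by omega
  rw [this, List.range'_succ, List.filter_cons]
  split_ifs with hf <;> simp_all

lemma pvUg_nil (n j : Nat) (g : List Bool) (h : n ≤ j) : pvUg n j g = [] := by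
  unfold pvUg
  have : n - j = 0 := by omega
  simp [this]

lemma pvUg_congr (n j : Nat) (g g' : List Bool)
    (h : ∀ k, j ≤ k → g'.getD k false = g.getD k false) :
    pvUg n j g' = pvUg n j g := by
  unfold pvUg
  apply List.filter_congr
  intro k hk
  simp only [List.mem_range'_1] at hk
  rw [h k hk.1]

-- characterisation of the inner loop
lemma pvInnerA_spec (boxes : List (List (List Int) × List String)) (t y1 y2 : Int) :
    ∀ fuel j g acc, boxes.length - j = fuel → g.length = boxes.length →
      (pvInnerA boxes t y1 y2 j g acc).1
          = acc ++ ((pvUg boxes.length j g).filter (pvP boxes t y1 y2)).map (pvGet boxes)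
      ∧ (pvInnerA boxes t y1 y2 j g acc).2.length = boxes.length
      ∧ pvUg boxes.length j (pvInnerA boxes t y1 y2 j g acc).2
          = (pvUg boxes.length j g).filter (fun k => !pvP boxes t y1 y2 k)
      ∧ ∀ k, k < j → (pvInnerA boxes t y1 y2 j g acc).2.getD k false = g.getD k false := by
  intro fuel
  induction fuel with
  | zero =>
    intro j g acc hj hg
    have hnj : ¬ j < boxes.length := by omega
    have h0 : ∀ g' : List Bool, pvUg boxes.length j g' = [] := fun g' => pvUg_nil _ _ _ (by omega)
    rw [pvInnerA]
    simp [hnj, h0, hg]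
  | succ fuel ih =>
    intro j g acc hj hg
    have hjn : j < boxes.length := by omega
    rw [pvInnerA]
    rw [dif_pos hjn]
    by_cases hf : g.getD j false = true
    · -- boxes[j] already grouped: skip
      have hcons : pvUg boxes.length j g = pvUg boxes.length (j+1) g := by
        rw [pvUg_cons _ _ _ hjn, if_pos hf]
      rw [if_pos hf, hcons]
      obtain ⟨h1, h2, h3, h4⟩ := ih (j+1) g acc (by omega) hg
      refine ⟨h1, h2, ?_, fun k hk => h4 k (by omega)⟩
      rw [pvUg_cons _ _ _ hjn, h4 j (by omega), if_pos hf]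
      exact h3
    · have hcons : pvUg boxes.length j g = j :: pvUg boxes.length (j+1) g := by
        rw [pvUg_cons _ _ _ hjn, if_neg hf]
      rw [if_neg hf, hcons]
      by_cases hp : pvP boxes t y1 y2 j = true
      · -- matched: flag j, append boxes[j]
        have hp' : |y1 - pvYminA (boxes.getD j ([], [])).1| < t ∨ |y2 - pvYmaxA (boxes.getD j ([], [])).1| < t := by
          have := hp; unfold pvP pvGet at this; exact of_decide_eq_true this
        rw [if_pos hp']
        obtain ⟨h1, h2, h3, h4⟩ := ih (j+1) (g.set j true) (acc ++ [boxes.getD j ([], [])]) (by omega) (by simp [hg])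
        have hug : pvUg boxes.length (j+1) (g.set j true) = pvUg boxes.length (j+1) g :=
          pvUg_congr _ _ _ _ (fun k hk => pvGetD_set_ne g j k (by omega))
        rw [hug] at h1 h3
        refine ⟨?_, h2, ?_, ?_⟩
        · rw [h1, List.filter_cons, if_pos hp]
          simp [pvGet]
        · rw [pvUg_cons _ _ _ hjn, h4 j (by omega), pvGetD_set_self g j (by omega), if_pos rfl, h3,
            List.filter_cons]
          simp [hp]
        · intro k hk
          rw [h4 k (by omega), pvGetD_set_ne g j k (by omega)]
      · -- not matched
        have hp' : ¬ (|y1 - pvYminA (boxes.getD j ([], [])).1| < t ∨ |y2 - pvYmaxA (boxes.getD j ([], [])).1| < t) := by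
          intro hc; unfold pvP pvGet at hp; exact hp (decide_eq_true hc)
        rw [if_neg hp']
        obtain ⟨h1, h2, h3, h4⟩ := ih (j+1) g acc (by omega) hg
        refine ⟨?_, h2, ?_, fun k hk => h4 k (by omega)⟩
        · rw [h1, List.filter_cons]
          simp [hp]
        · rw [pvUg_cons _ _ _ hjn, h4 j (by omega), if_neg hf, h3, List.filter_cons]
          simp [hp]

-- B-side helpers are definitionally the A-side ones
lemma pvYminB_eq : pvYminB = pvYminA := rfl
lemma pvYmaxB_eq : pvYmaxB = pvYmaxA := rfl
lemma pvXminB_eq : pvXminB = pvXminA := rfl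

lemma pvGoB_cons (t : Int) (s : Int × Int × (List (List Int) × List String))
    (rest : List (Int × Int × (List (List Int) × List String))) :
    pvGoB t (s :: rest) =
      ((PySem.List.sorted
          (s.2.2 :: (rest.partition (fun it => decide (|s.1 - it.1| < t ∨ |s.2.1 - it.2.1| < t))).1.map
            (fun it => it.2.2)) (fun bx => pvXminB bx.1) false).map
        (fun bx => PySem.List.pyGetD bx.2 0 "")) ::
      pvGoB t (rest.partition (fun it => decide (|s.1 - it.1| < t ∨ |s.2.1 - it.2.1| < t))).2 := by
  rw [pvGoB]

-- the outer loop is the peel recursion on the remaining items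
lemma pvOuterA_spec (boxes : List (List (List Int) × List String)) (t : Int) :
    ∀ fuel i g, boxes.length - i = fuel → g.length = boxes.length →
      pvOuterA boxes t i g
        = pvGoB t ((pvUg boxes.length i g).map
            (fun k => (pvYminB (pvGet boxes k).1, pvYmaxB (pvGet boxes k).1, pvGet boxes k))) := by
  intro fuel
  induction fuel with
  | zero =>
    intro i g hi hg
    rw [pvOuterA]
    have hni : ¬ i < boxes.length := by omega
    rw [dif_neg hni, pvUg_nil _ _ _ (by omega)]
    simp [pvGoB]
  | succ fuel ih =>
    intro i g hi hg
    have hin : i < boxes.length := by omega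
    rw [pvOuterA, dif_pos hin]
    by_cases hf : g.getD i false = true
    · have hcons : pvUg boxes.length i g = pvUg boxes.length (i+1) g := by
        rw [pvUg_cons _ _ _ hin, if_pos hf]
      rw [if_pos hf, hcons]
      exact ih (i+1) g (by omega) hg
    · have hcons : pvUg boxes.length i g = i :: pvUg boxes.length (i+1) g := by
        rw [pvUg_cons _ _ _ hin, if_neg hf]
      rw [if_neg hf, hcons, List.map_cons, pvGoB_cons]
      obtain ⟨h1, h2, h3, h4⟩ :=
        pvInnerA_spec boxes t (pvYminA (boxes.getD i ([], [])).1) (pvYmaxA (boxes.getD i ([], [])).1)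
          (boxes.length - (i+1)) (i+1) g [boxes.getD i ([], [])] rfl hg
      rw [pvYminB_eq, pvYmaxB_eq, pvXminB_eq]
      simp only [List.partition_eq_filter_filter, List.filter_map]
      have hpred : ∀ pk : Bool → Bool,
          ((fun it : Int × Int × (List (List Int) × List String) =>
              pk (decide (|pvYminA (pvGet boxes i).1 - it.1| < t ∨ |pvYmaxA (pvGet boxes i).1 - it.2.1| < t))) ∘
            (fun k => (pvYminA (pvGet boxes k).1, pvYmaxA (pvGet boxes k).1, pvGet boxes k)))
          = fun k => pk (pvP boxes t (pvYminA (pvGet boxes i).1) (pvYmaxA (pvGet boxes i).1) k) := by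
        intro pk; funext k; rfl
      congr 1
      · -- the emitted line
        congr 1
        rw [h1]
        have := hpred id
        simp only [id] at this
        rw [this]
        have hc : ((fun it : Int × Int × (List (List Int) × List String) => it.2.2) ∘
            fun k => (pvYminA (pvGet boxes k).1, pvYmaxA (pvGet boxes k).1, pvGet boxes k)) = pvGet boxes := rfl
        rw [List.map_map, hc, List.singleton_append]
        rfl
      · -- the recursive tail
        rw [ih (i+1) _ (by omega) h2, h3]
        congr 1

-- the B-side forward pass, seen through its first group: matched items update the head
-- group in order, unmatched items are processed against the tail state
lemma pvFold_cons (t : Int) (g : Int × Int × List (List (List Int) × List String))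
    (st : List (Int × Int × List (List (List Int) × List String)))
    (xs : List (Int × Int × (List (List Int) × List String))) :
    xs.foldl (fun st it => pvAssignB t it.1 it.2.1 it.2.2 st) (g :: st)
      = (g.1, g.2.1, g.2.2 ++ (xs.filter (fun it => decide (|g.1 - it.1| < t ∨ |g.2.1 - it.2.1| < t))).map (fun it => it.2.2))
        :: (xs.filter (fun it => !decide (|g.1 - it.1| < t ∨ |g.2.1 - it.2.1| < t))).foldl
            (fun st it => pvAssignB t it.1 it.2.1 it.2.2 st) st := by
  induction xs generalizing g st with
  | nil => simp
  | cons x xs ih =>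
    simp only [List.foldl_cons, List.filter_cons]
    by_cases hm : (|g.1 - x.1| < t ∨ |g.2.1 - x.2.1| < t)
    · rw [pvAssignB, if_pos hm]
      rw [ih (g.1, g.2.1, g.2.2 ++ [x.2.2]) st]
      simp [hm, List.append_assoc]
    · rw [pvAssignB, if_neg hm]
      rw [ih g (pvAssignB t x.1 x.2.1 x.2.2 st)]
      simp [hm]

-- the peel recursion computes exactly the rendered forward-pass state
lemma pvGoB_eq_fold (t : Int) :
    ∀ n (items : List (Int × Int × (List (List Int) × List String))), items.length ≤ n →
      pvGoB t items
        = (items.foldl (fun st it => pvAssignB t it.1 it.2.1 it.2.2 st) []).map pvRenderB := by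
  intro n
  induction n with
  | zero =>
    intro items h
    have : items = [] := List.length_eq_zero_iff.mp (by omega)
    subst this
    rw [pvGoB]; rfl
  | succ n ih =>
    intro items h
    match items with
    | [] => rw [pvGoB]; rfl
    | s :: rest =>
      rw [pvGoB_cons, List.foldl_cons]
      have hstep : pvAssignB t s.1 s.2.1 s.2.2 [] = [(s.1, s.2.1, [s.2.2])] := by
        rw [pvAssignB]
      rw [hstep, pvFold_cons, List.map_cons]
      simp only [List.partition_eq_filter_filter]
      congr 1
      simp only [Function.comp_def]
      have hlen : (rest.filter (fun it => !decide (|s.1 - it.1| < t ∨ |s.2.1 - it.2.1| < t))).length ≤ n := by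
        have := List.length_filter_le (fun it => !decide (|s.1 - it.1| < t ∨ |s.2.1 - it.2.1| < t)) rest
        simp at h
        omega
      rw [ih _ hlen]

-- ===== VERDICT (by name: the statement is the Claim_ definition above) =====
theorem match_boxes_within_distance_spec : Claim_equal_match_boxes_within_distance := by
  intro boxes threshold _ _
  unfold Spec_match_boxes_within_distance match_boxes_within_distance match_boxes_within_distance_alt
  rw [pvOuterA_spec boxes threshold boxes.length 0 _ rfl (by simp)]
  have h1 : pvUg boxes.length 0 (List.replicate boxes.length false) = List.range' 0 boxes.length := by
    unfold pvUg
    rw [Nat.sub_zero]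
    apply List.filter_eq_self.mpr
    intro k hk
    have hr : (List.replicate boxes.length false).getD k false = false := by
      simp only [List.getD, List.getElem?_replicate]
      split_ifs <;> rfl
    simp only [hr, Bool.not_false]
  rw [h1]
  have h2 : (List.range' 0 boxes.length).map (pvGet boxes) = boxes := by
    apply List.ext_getElem
    · simp
    · intro i hi1 hi2
      simp only [List.getElem_map, List.getElem_range', pvGet]
      rw [List.getD_eq_getElem]
      · simp
      · simpa using hi2
  have hsplit : (fun k => (pvYminB (pvGet boxes k).1, pvYmaxB (pvGet boxes k).1, pvGet boxes k))
      = (fun box : List (List Int) × List String => (pvYminB box.1, pvYmaxB box.1, box)) ∘ pvGet boxes := rfl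
  rw [hsplit, ← List.map_map, h2, pvGoB_eq_fold threshold boxes.length _ (by simp)]
  rw [List.foldl_map]
  rfl
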